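-- pv_equiv track=rewrite | github.com/shubin023/wan22_distillation | wan22_i2v_dmd_only/scripts/merge_lora_into_wan_weights.py | _base_key_from_lora
-- ===== SOURCE A (Python) =====
-- from typing import Dict, Tuple
--
-- def _normalize_key(key: str) -> str:
--     for prefix in ("diffusion_model.", "model."):
--         if key.startswith(prefix):
--             key = key[len(prefix):]
--     return key
--
-- def _base_key_from_lora(key: str) -> Tuple[str, str]:
--     """
--     Returns (base_key, role) where role is "A", "B", or "alpha".
--     If the key doesn't look like a LoRA tensor, returns ("", "").
--     """
--     key = _normalize_key(key)
--     suffix_map = {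
--         ".lora_A.weight": ("A", ".weight"),
--         ".lora_B.weight": ("B", ".weight"),
--         ".lora_A_generator.weight": ("A", ".weight"),
--         ".lora_B_generator.weight": ("B", ".weight"),
--         ".lora_A_critic.weight": ("A", ".weight"),
--         ".lora_B_critic.weight": ("B", ".weight"),
--         ".lora_down.weight": ("A", ".weight"),
--         ".lora_up.weight": ("B", ".weight"),
--     }
--     for suffix, (role, replacement) in suffix_map.items():
--         if key.endswith(suffix):
--             return key[: -len(suffix)] + replacement, role
--     return "", ""
-- ===== SOURCE B (Python) =====
-- _ROLE = {
--     "lora_A": "A", "lora_B": "B",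
--     "lora_A_generator": "A", "lora_B_generator": "B",
--     "lora_A_critic": "A", "lora_B_critic": "B",
--     "lora_down": "A", "lora_up": "B",
-- }
--
-- def _base_key_from_lora(key):
--     key = key.removeprefix("diffusion_model.").removeprefix("model.")
--     parts = key.rsplit(".", 2)
--     if len(parts) == 3 and parts[2] == "weight":
--         role = _ROLE.get(parts[1])
--         if role is not None:
--             return parts[0] + ".weight", role
--     return "", ""
-- ===== Notes on version B (the rewrite author's own statement) =====
-- stated objective: alternative
-- what changed: Instead of testing the normalized key against eight literal '.lora_*.weight' suffixes in a loop, B right-splits the key at its last two dots once (rsplit('.', 2)) and looks the middle token up in a role table; prefix stripping uses removeprefix.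
import Mathlib
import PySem

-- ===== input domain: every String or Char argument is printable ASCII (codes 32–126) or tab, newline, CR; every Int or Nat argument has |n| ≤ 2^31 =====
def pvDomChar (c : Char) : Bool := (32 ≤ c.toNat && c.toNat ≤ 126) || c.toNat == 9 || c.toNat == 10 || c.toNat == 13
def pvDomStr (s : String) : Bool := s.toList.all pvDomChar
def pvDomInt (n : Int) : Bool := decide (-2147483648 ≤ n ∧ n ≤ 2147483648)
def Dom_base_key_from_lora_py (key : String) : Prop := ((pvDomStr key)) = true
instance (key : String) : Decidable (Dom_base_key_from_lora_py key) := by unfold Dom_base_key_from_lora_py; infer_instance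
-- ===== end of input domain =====

-- B replaces A's eight endswith probes by one back-to-front split of the key at its last two dots
-- plus a single token lookup (objective: alternative decomposition, same exact return value).

-- ===== PORT A =====
-- _normalize_key: the for-loop over the two prefixes, unrolled; key[len(prefix):] is a slice
def normalizeKeyA (key : List Char) : List Char :=
  let k1 := if PySem.Chars.startswith key "diffusion_model.".toList then
              PySem.List.slice key (some 16) none else key
  if PySem.Chars.startswith k1 "model.".toList then PySem.List.slice k1 (some 6) none else k1

-- the for-loop over suffix_map.items(): the eight suffixes tested in insertion order, first hit returns
def suffixChainA (k : List Char) : String × String :=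
  if PySem.Chars.endswith k ".lora_A.weight".toList then
    (String.ofList (PySem.List.slice k none (some (-14)) ++ ".weight".toList), "A")
  else if PySem.Chars.endswith k ".lora_B.weight".toList then
    (String.ofList (PySem.List.slice k none (some (-14)) ++ ".weight".toList), "B")
  else if PySem.Chars.endswith k ".lora_A_generator.weight".toList then
    (String.ofList (PySem.List.slice k none (some (-24)) ++ ".weight".toList), "A")
  else if PySem.Chars.endswith k ".lora_B_generator.weight".toList then
    (String.ofList (PySem.List.slice k none (some (-24)) ++ ".weight".toList), "B")
  else if PySem.Chars.endswith k ".lora_A_critic.weight".toList then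
    (String.ofList (PySem.List.slice k none (some (-21)) ++ ".weight".toList), "A")
  else if PySem.Chars.endswith k ".lora_B_critic.weight".toList then
    (String.ofList (PySem.List.slice k none (some (-21)) ++ ".weight".toList), "B")
  else if PySem.Chars.endswith k ".lora_down.weight".toList then
    (String.ofList (PySem.List.slice k none (some (-17)) ++ ".weight".toList), "A")
  else if PySem.Chars.endswith k ".lora_up.weight".toList then
    (String.ofList (PySem.List.slice k none (some (-15)) ++ ".weight".toList), "B")
  else ("", "")

def base_key_from_lora_py (key : String) : String × String :=
  suffixChainA (normalizeKeyA key.toList)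

-- ===== PORT B =====
-- str.removeprefix (exact: drop the prefix iff the string starts with it)
def removePrefixB (l p : List Char) : List Char :=
  if PySem.Chars.startswith l p then l.drop p.length else l

-- hand port of key.rsplit(".", 2) (exact): scan from the right, cutting at the last two dots
def rsplitDot2 (l : List Char) : List (List Char) :=
  match (l.reverse).dropWhile (fun c => c != '.') with
  | [] => [l]
  | _ :: r1 =>
    match r1.dropWhile (fun c => c != '.') with
    | [] => [r1.reverse, ((l.reverse).takeWhile (fun c => c != '.')).reverse]
    | _ :: r2 => [r2.reverse, (r1.takeWhile (fun c => c != '.')).reverse,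
                  ((l.reverse).takeWhile (fun c => c != '.')).reverse]

-- _ROLE.get(tok): the literal dict, first-match lookup
def roleOfTok (tok : List Char) : Option String :=
  if tok = "lora_A".toList then some "A"
  else if tok = "lora_B".toList then some "B"
  else if tok = "lora_A_generator".toList then some "A"
  else if tok = "lora_B_generator".toList then some "B"
  else if tok = "lora_A_critic".toList then some "A"
  else if tok = "lora_B_critic".toList then some "B"
  else if tok = "lora_down".toList then some "A"
  else if tok = "lora_up".toList then some "B"
  else none

def parseB (k : List Char) : String × String :=
  match rsplitDot2 k with
  | [stem, tok, w] =>
    if w = "weight".toList then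
      match roleOfTok tok with
      | some role => (String.ofList (stem ++ ".weight".toList), role)
      | none => ("", "")
    else ("", "")
  | _ => ("", "")

def base_key_from_lora_py_alt (key : String) : String × String :=
  parseB (removePrefixB (removePrefixB key.toList "diffusion_model.".toList) "model.".toList)

-- ===== PRECONDITION & SPEC =====
def Spec_base_key_from_lora_py (key : String) (out : String × String) : Prop := out = base_key_from_lora_py_alt key
instance (key : String) (out : String × String) : Decidable (Spec_base_key_from_lora_py key out) := by unfold Spec_base_key_from_lora_py; infer_instance

-- ===== CLAIM (what is proved, stated in full; the proofs are below) =====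
def Claim_equal_base_key_from_lora_py : Prop := ∀ (key : String), Dom_base_key_from_lora_py key → Spec_base_key_from_lora_py key (base_key_from_lora_py key)

-- ===== LEMMAS AND PROOFS =====

-- a dot-terminated block is a prefix of another iff the dot-free heads agree and the tails nest
lemma prefix_dot (u : List Char) : ∀ (w : List Char), ('.' : Char) ∉ u → ('.' : Char) ∉ w →
    ∀ v z : List Char, (u ++ '.' :: v <+: w ++ '.' :: z ↔ u = w ∧ v <+: z) := by
  induction u with
  | nil =>
    intro w hu hw v z
    cases w with
    | nil => simp
    | cons c w' =>
      simp only [List.mem_cons, not_or] at hw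
      simp only [List.nil_append, List.cons_append, List.cons_prefix_cons]
      constructor
      · rintro ⟨h1, _⟩; exact absurd h1 hw.1
      · rintro ⟨h, _⟩; exact absurd h (by simp)
  | cons a u' ih =>
    intro w hu hw v z
    simp only [List.mem_cons, not_or] at hu
    cases w with
    | nil =>
      simp only [List.cons_append, List.nil_append, List.cons_prefix_cons]
      constructor
      · rintro ⟨h1, _⟩; exact absurd h1.symm hu.1
      · rintro ⟨h, _⟩; exact absurd h (by simp)
    | cons c w' =>
      simp only [List.mem_cons, not_or] at hw
      simp only [List.cons_append, List.cons_prefix_cons, ih w' hu.2 hw.2 v z, List.cons.injEq]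
      tauto

lemma rev_decomp (k pre s : List Char) (h : k.reverse = s.reverse ++ pre) : k = pre.reverse ++ s := by
  have h2 := congrArg List.reverse h
  rwa [List.reverse_reverse, List.reverse_append, List.reverse_reverse] at h2

-- key[:-len(s)] on a key that ends with s strips exactly s
lemma slice_strip (pre s : List Char) (hs : s ≠ []) (m : Int) (hm : m = -(s.length : Int)) :
    PySem.List.slice (pre ++ s) none (some m) = pre := by
  subst hm
  have h0 : 0 < s.length := List.length_pos_iff.mpr hs
  simp only [PySem.List.slice, PySem.List.clampIdx, List.length_append]
  have hlt : -(s.length : Int) < 0 := by omega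
  have hge : ¬ ((((pre.length + s.length : Nat) : Int)) + -(s.length : Int) < 0) := by push_cast; omega
  rw [if_pos hlt, if_neg hge]
  have hN : ((((pre.length + s.length : Nat) : Int)) + -(s.length : Int)).toNat = pre.length := by
    push_cast; omega
  rw [hN]
  simp [List.take_left (l₁ := pre) (l₂ := s)]

lemma norm_eq (k : List Char) :
    normalizeKeyA k = removePrefixB (removePrefixB k "diffusion_model.".toList) "model.".toList := by
  have e16 : ∀ l : List Char, PySem.List.slice l (some 16) none = l.drop ("diffusion_model.".toList.length) :=
    fun l => by rw [PySem.List.slice_from l (by norm_num)]; rfl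
  have e6 : ∀ l : List Char, PySem.List.slice l (some 6) none = l.drop ("model.".toList.length) :=
    fun l => by rw [PySem.List.slice_from l (by norm_num)]; rfl
  simp only [normalizeKeyA, removePrefixB, e16, e6]

-- the heart: on any (normalized) key, A's suffix chain and B's right-split parse agree
lemma core (k : List Char) : suffixChainA k = parseB k := by
  cases hd1 : List.dropWhile (fun c => c != '.') k.reverse with
  | nil =>
    -- no dot at all in the key: no suffix can match, and rsplit returns a single part
    have hnd : ('.' : Char) ∉ k := by
      intro hm
      have h := List.dropWhile_eq_nil_iff.mp hd1 '.' (List.mem_reverse.mpr hm)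
      simp at h
    have hf : ∀ s : List Char, ('.' : Char) ∈ s → PySem.Chars.endswith k s = false := by
      intro s hs
      cases h : PySem.Chars.endswith k s with
      | false => rfl
      | true => exact absurd (List.IsSuffix.mem hs ((PySem.Chars.endswith_iff k s).mp h)) hnd
    simp only [suffixChainA, parseB, rsplitDot2, hd1]
    rw [      hf ".lora_A.weight".toList (by decide),
      hf ".lora_B.weight".toList (by decide),
      hf ".lora_A_generator.weight".toList (by decide),
      hf ".lora_B_generator.weight".toList (by decide),
      hf ".lora_A_critic.weight".toList (by decide),
      hf ".lora_B_critic.weight".toList (by decide),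
      hf ".lora_down.weight".toList (by decide),
      hf ".lora_up.weight".toList (by decide)]
    simp
  | cons c r1 =>
    have hne1 : List.dropWhile (fun c => c != '.') k.reverse ≠ [] := by rw [hd1]; simp
    have hc : c = '.' := by
      have h := List.head_dropWhile_not (fun c => c != '.') hne1
      simp only [hd1, List.head_cons, bne_eq_false_iff_eq] at h
      exact h
    have hw : ('.' : Char) ∉ List.takeWhile (fun c => c != '.') k.reverse := by
      intro hm; have h := List.mem_takeWhile_imp hm; simp at h
    have hsplit : k.reverse = List.takeWhile (fun c => c != '.') k.reverse ++ '.' :: r1 := by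
      conv_lhs => rw [← List.takeWhile_append_dropWhile (p := fun c => c != '.') (l := k.reverse)]
      rw [hd1, hc]
    cases hd2 : List.dropWhile (fun c => c != '.') r1 with
    | nil =>
      -- exactly one dot: every suffix needs two, rsplit returns two parts
      have hnd1 : ('.' : Char) ∉ r1 := by
        intro hm
        have h := List.dropWhile_eq_nil_iff.mp hd2 '.' hm
        simp at h
      have hf : ∀ s u v : List Char, s.reverse = u ++ '.' :: (v ++ '.' :: []) → ('.' : Char) ∉ u →
          PySem.Chars.endswith k s = false := by
        intro s u v hs hu
        cases h : PySem.Chars.endswith k s with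
        | false => rfl
        | true =>
          exfalso
          have hp : s.reverse <+: k.reverse :=
            List.reverse_prefix.mpr ((PySem.Chars.endswith_iff k s).mp h)
          rw [hs, hsplit] at hp
          have h2 := (prefix_dot u _ hu hw _ _).mp hp
          exact hnd1 (List.IsPrefix.mem (by simp) h2.2)
      simp only [suffixChainA, parseB, rsplitDot2, hd1, hd2]
      rw [      hf ".lora_A.weight".toList "thgiew".toList "A_arol".toList (by decide) (by decide),
      hf ".lora_B.weight".toList "thgiew".toList "B_arol".toList (by decide) (by decide),
      hf ".lora_A_generator.weight".toList "thgiew".toList "rotareneg_A_arol".toList (by decide) (by decide),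
      hf ".lora_B_generator.weight".toList "thgiew".toList "rotareneg_B_arol".toList (by decide) (by decide),
      hf ".lora_A_critic.weight".toList "thgiew".toList "citirc_A_arol".toList (by decide) (by decide),
      hf ".lora_B_critic.weight".toList "thgiew".toList "citirc_B_arol".toList (by decide) (by decide),
      hf ".lora_down.weight".toList "thgiew".toList "nwod_arol".toList (by decide) (by decide),
      hf ".lora_up.weight".toList "thgiew".toList "pu_arol".toList (by decide) (by decide)]
      simp
    | cons c2 r2 =>
      -- two or more dots: both sides are determined by the last two dot-separated components
      have hne2 : List.dropWhile (fun c => c != '.') r1 ≠ [] := by rw [hd2]; simp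
      have hc2 : c2 = '.' := by
        have h := List.head_dropWhile_not (fun c => c != '.') hne2
        simp only [hd2, List.head_cons, bne_eq_false_iff_eq] at h
        exact h
      have ht : ('.' : Char) ∉ List.takeWhile (fun c => c != '.') r1 := by
        intro hm; have h := List.mem_takeWhile_imp hm; simp at h
      have hsplit2 : r1 = List.takeWhile (fun c => c != '.') r1 ++ '.' :: r2 := by
        conv_lhs => rw [← List.takeWhile_append_dropWhile (p := fun c => c != '.') (l := r1)]
        rw [hd2, hc2]
      set w' := List.takeWhile (fun c => c != '.') k.reverse with hw'def
      set t := List.takeWhile (fun c => c != '.') r1 with htdef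
      have hr : k.reverse = w' ++ '.' :: (t ++ '.' :: r2) := by
        rw [hsplit, hsplit2]
      have E : ∀ s u v : List Char, s.reverse = u ++ '.' :: (v ++ '.' :: []) → ('.' : Char) ∉ u →
          ('.' : Char) ∉ v → (PySem.Chars.endswith k s = true ↔ (u = w' ∧ v = t)) := by
        intro s u v hs hu hv
        rw [PySem.Chars.endswith_iff, ← List.reverse_prefix, hr, hs,
          prefix_dot u w' hu hw, prefix_dot v t hv ht]
        simp
      simp only [suffixChainA, parseB, rsplitDot2, hd1, hd2, ← hw'def, ← htdef,
        E ".lora_A.weight".toList "thgiew".toList "A_arol".toList (by decide) (by decide) (by decide),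
        E ".lora_B.weight".toList "thgiew".toList "B_arol".toList (by decide) (by decide) (by decide),
        E ".lora_A_generator.weight".toList "thgiew".toList "rotareneg_A_arol".toList (by decide) (by decide) (by decide),
        E ".lora_B_generator.weight".toList "thgiew".toList "rotareneg_B_arol".toList (by decide) (by decide) (by decide),
        E ".lora_A_critic.weight".toList "thgiew".toList "citirc_A_arol".toList (by decide) (by decide) (by decide),
        E ".lora_B_critic.weight".toList "thgiew".toList "citirc_B_arol".toList (by decide) (by decide) (by decide),
        E ".lora_down.weight".toList "thgiew".toList "nwod_arol".toList (by decide) (by decide) (by decide),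
        E ".lora_up.weight".toList "thgiew".toList "pu_arol".toList (by decide) (by decide) (by decide)]
      by_cases hw1 : w' = "thgiew".toList
      · by_cases ht1 : t = "A_arol".toList
        · have hk : k = r2.reverse ++ ".lora_A.weight".toList :=
            rev_decomp k r2 ".lora_A.weight".toList (by rw [hr, hw1, ht1]; rfl)
          have hsl := slice_strip r2.reverse ".lora_A.weight".toList (by decide) (-14) (by decide)
          rw [hw1, ht1, hk, hsl]
          simp [roleOfTok]
        · by_cases ht2 : t = "B_arol".toList
          · have hk : k = r2.reverse ++ ".lora_B.weight".toList :=
              rev_decomp k r2 ".lora_B.weight".toList (by rw [hr, hw1, ht2]; rfl)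
            have hsl := slice_strip r2.reverse ".lora_B.weight".toList (by decide) (-14) (by decide)
            rw [hw1, ht2, hk, hsl]
            simp [roleOfTok]
          · by_cases ht3 : t = "rotareneg_A_arol".toList
            · have hk : k = r2.reverse ++ ".lora_A_generator.weight".toList :=
                rev_decomp k r2 ".lora_A_generator.weight".toList (by rw [hr, hw1, ht3]; rfl)
              have hsl := slice_strip r2.reverse ".lora_A_generator.weight".toList (by decide) (-24) (by decide)
              rw [hw1, ht3, hk, hsl]
              simp [roleOfTok]
            · by_cases ht4 : t = "rotareneg_B_arol".toList
              · have hk : k = r2.reverse ++ ".lora_B_generator.weight".toList :=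
                  rev_decomp k r2 ".lora_B_generator.weight".toList (by rw [hr, hw1, ht4]; rfl)
                have hsl := slice_strip r2.reverse ".lora_B_generator.weight".toList (by decide) (-24) (by decide)
                rw [hw1, ht4, hk, hsl]
                simp [roleOfTok]
              · by_cases ht5 : t = "citirc_A_arol".toList
                · have hk : k = r2.reverse ++ ".lora_A_critic.weight".toList :=
                    rev_decomp k r2 ".lora_A_critic.weight".toList (by rw [hr, hw1, ht5]; rfl)
                  have hsl := slice_strip r2.reverse ".lora_A_critic.weight".toList (by decide) (-21) (by decide)
                  rw [hw1, ht5, hk, hsl]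
                  simp [roleOfTok]
                · by_cases ht6 : t = "citirc_B_arol".toList
                  · have hk : k = r2.reverse ++ ".lora_B_critic.weight".toList :=
                      rev_decomp k r2 ".lora_B_critic.weight".toList (by rw [hr, hw1, ht6]; rfl)
                    have hsl := slice_strip r2.reverse ".lora_B_critic.weight".toList (by decide) (-21) (by decide)
                    rw [hw1, ht6, hk, hsl]
                    simp [roleOfTok]
                  · by_cases ht7 : t = "nwod_arol".toList
                    · have hk : k = r2.reverse ++ ".lora_down.weight".toList :=
                        rev_decomp k r2 ".lora_down.weight".toList (by rw [hr, hw1, ht7]; rfl)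
                      have hsl := slice_strip r2.reverse ".lora_down.weight".toList (by decide) (-17) (by decide)
                      rw [hw1, ht7, hk, hsl]
                      simp [roleOfTok]
                    · by_cases ht8 : t = "pu_arol".toList
                      · have hk : k = r2.reverse ++ ".lora_up.weight".toList :=
                          rev_decomp k r2 ".lora_up.weight".toList (by rw [hr, hw1, ht8]; rfl)
                        have hsl := slice_strip r2.reverse ".lora_up.weight".toList (by decide) (-15) (by decide)
                        rw [hw1, ht8, hk, hsl]
                        simp [roleOfTok]
                      · have hrole : roleOfTok t.reverse = none := by
                          unfold roleOfTok
                          rw [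
                              if_neg (show ¬(t.reverse = "lora_A".toList) from fun h => ht1 (by rw [← List.reverse_reverse t, h]; rfl)),
                              if_neg (show ¬(t.reverse = "lora_B".toList) from fun h => ht2 (by rw [← List.reverse_reverse t, h]; rfl)),
                              if_neg (show ¬(t.reverse = "lora_A_generator".toList) from fun h => ht3 (by rw [← List.reverse_reverse t, h]; rfl)),
                              if_neg (show ¬(t.reverse = "lora_B_generator".toList) from fun h => ht4 (by rw [← List.reverse_reverse t, h]; rfl)),
                              if_neg (show ¬(t.reverse = "lora_A_critic".toList) from fun h => ht5 (by rw [← List.reverse_reverse t, h]; rfl)),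
                              if_neg (show ¬(t.reverse = "lora_B_critic".toList) from fun h => ht6 (by rw [← List.reverse_reverse t, h]; rfl)),
                              if_neg (show ¬(t.reverse = "lora_down".toList) from fun h => ht7 (by rw [← List.reverse_reverse t, h]; rfl)),
                              if_neg (show ¬(t.reverse = "lora_up".toList) from fun h => ht8 (by rw [← List.reverse_reverse t, h]; rfl))]
                        rw [hw1,
                          if_neg (show ¬("thgiew".toList = "thgiew".toList ∧ "A_arol".toList = t) from fun hp => ht1 (Eq.symm hp.2)),
                          if_neg (show ¬("thgiew".toList = "thgiew".toList ∧ "B_arol".toList = t) from fun hp => ht2 (Eq.symm hp.2)),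
                          if_neg (show ¬("thgiew".toList = "thgiew".toList ∧ "rotareneg_A_arol".toList = t) from fun hp => ht3 (Eq.symm hp.2)),
                          if_neg (show ¬("thgiew".toList = "thgiew".toList ∧ "rotareneg_B_arol".toList = t) from fun hp => ht4 (Eq.symm hp.2)),
                          if_neg (show ¬("thgiew".toList = "thgiew".toList ∧ "citirc_A_arol".toList = t) from fun hp => ht5 (Eq.symm hp.2)),
                          if_neg (show ¬("thgiew".toList = "thgiew".toList ∧ "citirc_B_arol".toList = t) from fun hp => ht6 (Eq.symm hp.2)),
                          if_neg (show ¬("thgiew".toList = "thgiew".toList ∧ "nwod_arol".toList = t) from fun hp => ht7 (Eq.symm hp.2)),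
                          if_neg (show ¬("thgiew".toList = "thgiew".toList ∧ "pu_arol".toList = t) from fun hp => ht8 (Eq.symm hp.2)),
                          if_pos (show ("thgiew".toList).reverse = "weight".toList by decide),
                          hrole]
      · have hWr : ¬ (w'.reverse = "weight".toList) :=
          fun h => hw1 (by rw [← List.reverse_reverse w', h]; rfl)
        rw [
          if_neg (show ¬("thgiew".toList = w' ∧ "A_arol".toList = t) from fun hp => hw1 (Eq.symm hp.1)),
          if_neg (show ¬("thgiew".toList = w' ∧ "B_arol".toList = t) from fun hp => hw1 (Eq.symm hp.1)),
          if_neg (show ¬("thgiew".toList = w' ∧ "rotareneg_A_arol".toList = t) from fun hp => hw1 (Eq.symm hp.1)),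
          if_neg (show ¬("thgiew".toList = w' ∧ "rotareneg_B_arol".toList = t) from fun hp => hw1 (Eq.symm hp.1)),
          if_neg (show ¬("thgiew".toList = w' ∧ "citirc_A_arol".toList = t) from fun hp => hw1 (Eq.symm hp.1)),
          if_neg (show ¬("thgiew".toList = w' ∧ "citirc_B_arol".toList = t) from fun hp => hw1 (Eq.symm hp.1)),
          if_neg (show ¬("thgiew".toList = w' ∧ "nwod_arol".toList = t) from fun hp => hw1 (Eq.symm hp.1)),
          if_neg (show ¬("thgiew".toList = w' ∧ "pu_arol".toList = t) from fun hp => hw1 (Eq.symm hp.1)),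
          if_neg hWr]

-- ===== VERDICT (by name: the statement is the Claim_ definition above) =====
theorem base_key_from_lora_py_spec : Claim_equal_base_key_from_lora_py := by
  intro key _
  unfold Spec_base_key_from_lora_py base_key_from_lora_py base_key_from_lora_py_alt
  rw [norm_eq, core]
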